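-- pv_equiv track=rewrite | github.com/amit11794/hackerrank-euler | solution/244.py | addToCheckSum
-- ===== SOURCE A (Python) =====
-- def addToCheckSum(begin, end):
--     # Compute checksum for a path (given the beginning and the end)
--     checksum = 0
--     for move in begin[0][1:]:
--         checksum = (checksum * 243 + ord(move)) % 100000007
--     # The end has to be reversed and commands must be inverted (ie: L --> R)
--     for move in end[0][1:][::-1]:
--         if move == "L":
--             checksum = (checksum * 243 + ord("R")) % 100000007
--         elif move == "R":
--             checksum = (checksum * 243 + ord("L")) % 100000007
--         elif move == "U":
--             checksum = (checksum * 243 + ord("D")) % 100000007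
--         else:
--             checksum = (checksum * 243 + ord("U")) % 100000007
--     return checksum
-- ===== SOURCE B (Python) =====
-- def addToCheckSum(begin, end):
--     # Hash computed back-to-front: scan the hashed sequence from its LAST
--     # character to its first, keeping the running power of the base 243 and
--     # summing ord(char) * power.  Since the (inverted) end part is hashed
--     # last, scanning backwards means reading end[0][1:] FORWARD (no reversal
--     # at all) and then begin[0][1:] backwards.
--     M = 100000007
--     inv = {"L": "R", "R": "L", "U": "D"}
--     total, p = 0, 1
--     for c in end[0][1:]:
--         total = (total + ord(inv.get(c, "U")) * p) % M
--         p = p * 243 % M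
--     for c in begin[0][1:][::-1]:
--         total = (total + ord(c) * p) % M
--         p = p * 243 % M
--     return total
-- ===== Notes on version B (the rewrite author's own statement) =====
-- stated objective: alternative
-- what changed: B evaluates the polynomial hash back-to-front (sum of ord(c)*243^k with a running power accumulator, scanning end[0][1:] forward without any reversal and then begin[0][1:] backward) instead of A's front-to-back Horner recurrence checksum*243+ord(c) over begin then reversed end.
import Mathlib
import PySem

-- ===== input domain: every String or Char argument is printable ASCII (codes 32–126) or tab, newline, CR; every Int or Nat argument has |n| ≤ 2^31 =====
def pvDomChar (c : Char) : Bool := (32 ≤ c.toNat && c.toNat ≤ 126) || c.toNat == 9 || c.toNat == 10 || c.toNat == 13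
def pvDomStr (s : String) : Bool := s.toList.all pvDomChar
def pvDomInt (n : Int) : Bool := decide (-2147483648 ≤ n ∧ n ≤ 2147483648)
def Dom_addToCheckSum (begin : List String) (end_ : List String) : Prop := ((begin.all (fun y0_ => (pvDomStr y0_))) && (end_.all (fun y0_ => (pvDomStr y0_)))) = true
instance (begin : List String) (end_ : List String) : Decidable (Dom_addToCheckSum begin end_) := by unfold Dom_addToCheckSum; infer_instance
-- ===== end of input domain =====

-- B evaluates the polynomial hash back-to-front (sum of ord*243^k with a running power
-- accumulator; end[0][1:] read forward, begin[0][1:] backward) instead of A's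
-- front-to-back Horner recurrence. Objective: alternative.

-- ===== PORT A =====
def addToCheckSum (begin : List String) (end_ : List String) : Int :=
  -- first loop: over begin[0][1:]
  let c1 : Int :=
    (PySem.List.slice (PySem.List.pyGetD begin 0 "").toList (some 1) none).foldl
      (fun checksum move => PySem.Int.mod (checksum * 243 + (move.toNat : Int)) 100000007) 0
  -- second loop: over end[0][1:][::-1], with the if/elif chain
  ((PySem.List.slice (PySem.List.pyGetD end_ 0 "").toList (some 1) none).reverse).foldl
    (fun checksum move =>
      if move = 'L' then PySem.Int.mod (checksum * 243 + ('R'.toNat : Int)) 100000007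
      else if move = 'R' then PySem.Int.mod (checksum * 243 + ('L'.toNat : Int)) 100000007
      else if move = 'U' then PySem.Int.mod (checksum * 243 + ('D'.toNat : Int)) 100000007
      else PySem.Int.mod (checksum * 243 + ('U'.toNat : Int)) 100000007) c1

-- ===== PORT B =====
-- inv.get(c, "U")
def invMove (c : Char) : Char :=
  if c = 'L' then 'R' else if c = 'R' then 'L' else if c = 'U' then 'D' else 'U'

-- one step of B's backward scan on the state (total, p)
def stepB (st : Int × Int) (m : Char) : Int × Int :=
  (PySem.Int.mod (st.1 + (m.toNat : Int) * st.2) 100000007,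
   PySem.Int.mod (st.2 * 243) 100000007)

def addToCheckSum_alt (begin : List String) (end_ : List String) : Int :=
  -- first loop: end[0][1:] read forward, moves inverted
  let st1 :=
    (PySem.List.slice (PySem.List.pyGetD end_ 0 "").toList (some 1) none).foldl
      (fun st c => stepB st (invMove c)) (0, 1)
  -- second loop: begin[0][1:][::-1]
  (((PySem.List.slice (PySem.List.pyGetD begin 0 "").toList (some 1) none).reverse).foldl
      stepB st1).1

-- ===== PRECONDITION & SPEC =====
-- A indexes begin[0] and end[0], so it raises IndexError on an empty begin or end list;
-- exactly those inputs are excluded.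
def Pre_addToCheckSum (begin : List String) (end_ : List String) : Prop :=
  begin ≠ [] ∧ end_ ≠ []
instance (begin : List String) (end_ : List String) : Decidable (Pre_addToCheckSum begin end_) := by
  unfold Pre_addToCheckSum; infer_instance

def pvWitness_addToCheckSum : List String × List String := (["ULDR"], ["DRRL"])

def Spec_addToCheckSum (begin : List String) (end_ : List String) (out : Int) : Prop := out = addToCheckSum_alt begin end_
instance (begin : List String) (end_ : List String) (out : Int) : Decidable (Spec_addToCheckSum begin end_ out) := by unfold Spec_addToCheckSum; infer_instance

-- ===== CLAIM (what is proved, stated in full; the proofs are below) =====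
def Claim_equal_addToCheckSum : Prop := ∀ (begin : List String) (end_ : List String), Dom_addToCheckSum begin end_ → Pre_addToCheckSum begin end_ → Spec_addToCheckSum begin end_ (addToCheckSum begin end_)

-- ===== LEMMAS AND PROOFS =====

-- the (un-modded) polynomial value of a character sequence, Horner style
def poly (l : List Char) : Int := l.foldl (fun a m => a * 243 + (m.toNat : Int)) 0
def polyFrom (init : Int) (l : List Char) : Int := l.foldl (fun a m => a * 243 + (m.toNat : Int)) init

lemma poly_concat (l : List Char) (m : Char) :
    poly (l ++ [m]) = poly l * 243 + (m.toNat : Int) := by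
  simp [poly, List.foldl_append]

lemma emod_absorb1 (a k y M : Int) : (a % M * k + y) % M = (a * k + y) % M :=
  Int.ModEq.add_right y (Int.ModEq.mul_right k (Int.emod_emod_of_dvd a dvd_rfl))

lemma emod_absorb2 (t x p M : Int) : (t % M + x * (p % M)) % M = (t + x * p) % M :=
  Int.ModEq.add (Int.emod_emod_of_dvd t dvd_rfl)
    (Int.ModEq.mul_left x (Int.emod_emod_of_dvd p dvd_rfl))

lemma emod_absorb3 (p k M : Int) : (p % M * k) % M = (p * k) % M :=
  Int.ModEq.mul_right k (Int.emod_emod_of_dvd p dvd_rfl)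

-- A's Horner loop, started from a reduced value, computes the un-modded polynomial mod M
lemma hornerA (l : List Char) : ∀ (init : Int),
    l.foldl (fun c m => (c * 243 + (m.toNat : Int)) % 100000007) (init % 100000007)
      = (polyFrom init l) % 100000007 := by
  induction l with
  | nil => intro init; simp [polyFrom]
  | cons m l ih =>
      intro init
      simp only [List.foldl_cons, polyFrom]
      rw [emod_absorb1]
      exact ih (init * 243 + (m.toNat : Int))

-- B's backward scan with a power accumulator computes t + poly(reverse)·p mod M
lemma foldB (r : List Char) : ∀ (t p : Int),
    (r.foldl (fun st m => ((st.1 + (m.toNat : Int) * st.2) % 100000007,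
                           (st.2 * 243) % 100000007)) (t % 100000007, p % 100000007)).1
      = (t + poly r.reverse * p) % 100000007 := by
  induction r with
  | nil => intro t p; simp [poly]
  | cons m r ih =>
      intro t p
      simp only [List.foldl_cons]
      rw [emod_absorb2, emod_absorb3]
      rw [show ((t + (m.toNat : Int) * p) % 100000007, (p * 243) % 100000007)
            = ((t + (m.toNat : Int) * p) % 100000007, (p * 243) % 100000007) from rfl]
      rw [ih (t + (m.toNat : Int) * p) (p * 243)]
      rw [List.reverse_cons, poly_concat]
      congr 1
      ring

-- ===== VERDICT (by name: the statement is the Claim_ definition above) =====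
theorem addToCheckSum_spec : Claim_equal_addToCheckSum := by
  intro begin end_ _ _
  unfold Spec_addToCheckSum addToCheckSum addToCheckSum_alt stepB
  simp only [PySem.Int.mod_eq_emod_of_pos (show (0:Int) < 100000007 by norm_num)]
  set b := PySem.List.slice (PySem.List.pyGetD begin 0 "").toList (some 1) none with hb
  set e := PySem.List.slice (PySem.List.pyGetD end_ 0 "").toList (some 1) none with he
  -- A side: fold the branchy step as the uniform step over inverted moves, merge the loops
  have stepeq : ∀ (c : Int) (m : Char),
      (if m = 'L' then (c * 243 + ('R'.toNat : Int)) % 100000007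
       else if m = 'R' then (c * 243 + ('L'.toNat : Int)) % 100000007
       else if m = 'U' then (c * 243 + ('D'.toNat : Int)) % 100000007
       else (c * 243 + ('U'.toNat : Int)) % 100000007)
      = (c * 243 + ((invMove m).toNat : Int)) % 100000007 := by
    intro c m; unfold invMove; split_ifs <;> rfl
  calc (e.reverse.foldl
          (fun checksum move =>
            if move = 'L' then (checksum * 243 + ('R'.toNat : Int)) % 100000007
            else if move = 'R' then (checksum * 243 + ('L'.toNat : Int)) % 100000007
            else if move = 'U' then (checksum * 243 + ('D'.toNat : Int)) % 100000007
            else (checksum * 243 + ('U'.toNat : Int)) % 100000007)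
          (b.foldl (fun c m => (c * 243 + (m.toNat : Int)) % 100000007) 0))
      = (b ++ e.reverse.map invMove).foldl
          (fun c m => (c * 243 + (m.toNat : Int)) % 100000007) 0 := by
        rw [List.foldl_append, List.foldl_map]
        exact congrArg₂ (fun f init => List.foldl f init e.reverse)
          (by funext c m; exact stepeq c m) rfl
    _ = poly (b ++ e.reverse.map invMove) % 100000007 := by
        rw [show (0:Int) = 0 % 100000007 from rfl, hornerA]; rfl
    _ = (b.reverse.foldl
          (fun st m => ((st.1 + (m.toNat : Int) * st.2) % 100000007,
                        (st.2 * 243) % 100000007))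
          (e.foldl (fun st c =>
            ((st.1 + ((invMove c).toNat : Int) * st.2) % 100000007,
             (st.2 * 243) % 100000007)) ((0:Int), (1:Int)))).1 := by
        have hmapB : e.foldl (fun st c =>
              ((st.1 + ((invMove c).toNat : Int) * st.2) % 100000007,
               (st.2 * 243) % 100000007)) ((0:Int), (1:Int))
            = (e.map invMove).foldl (fun st m =>
              ((st.1 + (m.toNat : Int) * st.2) % 100000007,
               (st.2 * 243) % 100000007)) ((0:Int), (1:Int)) := by
          rw [List.foldl_map]
        rw [hmapB, ← List.foldl_append]
        rw [show ((0:Int), (1:Int)) = ((0:Int) % 100000007, (1:Int) % 100000007) from rfl]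
        rw [foldB]
        rw [List.reverse_append, List.reverse_reverse]
        have hmr : (e.map invMove).reverse = e.reverse.map invMove := by
          simp [List.map_reverse]
        rw [hmr]
        ring_nf
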